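-- pv_equiv track=rewrite | github.com/LukasBuschmann/Domain-Interface-Explorer | domain_interface_explorer/serverlib/interface_embedding.py | mask_alignment_to_fragment_ranges
-- ===== SOURCE A (Python) =====
-- def fragment_ranges(fragment_key: str) -> list[tuple[int, int]]:
--     ranges: list[tuple[int, int]] = []
--     for part in str(fragment_key or "").split(","):
--         fragment_part = part.strip()
--         if not fragment_part:
--             continue
--         start_text, end_text = fragment_part.split("-", maxsplit=1)
--         ranges.append((int(start_text), int(end_text)))
--     return ranges
--
-- def fragment_start(fragment_key: str) -> int:
--     ranges = fragment_ranges(fragment_key)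
--     return ranges[0][0] if ranges else 1
--
-- def mask_alignment_to_fragment_ranges(
--     aligned_sequence: str,
--     alignment_fragment: str,
--     exact_fragment: str,
-- ) -> tuple[str, list[int | None]]:
--     if not aligned_sequence:
--         return "", []
--     allowed_residue_ids: set[int] = set()
--     for start, end in fragment_ranges(exact_fragment):
--         allowed_residue_ids.update(range(start, end + 1))
--     next_residue = fragment_start(alignment_fragment)
--     masked_chars: list[str] = []
--     residue_ids: list[int | None] = []
--     for char in aligned_sequence:
--         if not char.isalpha():
--             masked_chars.append(char)
--             residue_ids.append(None)
--             continue
--         residue_id = next_residue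
--         next_residue += 1
--         if residue_id in allowed_residue_ids:
--             masked_chars.append(char)
--             residue_ids.append(residue_id)
--             continue
--         masked_chars.append("-")
--         residue_ids.append(None)
--     return "".join(masked_chars), residue_ids
-- ===== SOURCE B (Python) =====
-- def _parse_pair(text: str) -> tuple[int, int]:
--     lo, hi = text.split("-", 1)
--     return int(lo), int(hi)
--
--
-- def _interval_list(key: str) -> list[tuple[int, int]]:
--     texts = [part.strip() for part in (key or "").split(",")]
--     return [_parse_pair(t) for t in texts if t]
--
--
-- def mask_alignment_to_fragment_ranges(
--     aligned_sequence: str,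
--     alignment_fragment: str,
--     exact_fragment: str,
-- ) -> tuple[str, list[int | None]]:
--     if not aligned_sequence:
--         return "", []
--     # Merge the allowed ranges into a sorted, disjoint interval list instead of
--     # materialising every allowed residue id in a set.
--     intervals = [(s, e) for s, e in _interval_list(exact_fragment) if s <= e]
--     intervals.sort(key=lambda r: r[0])
--     merged: list[tuple[int, int]] = []
--     for start, end in intervals:
--         if merged and start <= merged[-1][1] + 1:
--             if end > merged[-1][1]:
--                 merged[-1] = (merged[-1][0], end)
--         else:
--             merged.append((start, end))
--     starts = _interval_list(alignment_fragment)
--     residue = starts[0][0] if starts else 1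
--     masked_chars: list[str] = []
--     residue_ids: list[int | None] = []
--     for char in aligned_sequence:
--         if char.isalpha():
--             ok = False
--             for lo, hi in merged:
--                 if lo > residue:
--                     break
--                 if residue <= hi:
--                     ok = True
--                     break
--             masked_chars.append(char if ok else "-")
--             residue_ids.append(residue if ok else None)
--             residue += 1
--         else:
--             masked_chars.append(char)
--             residue_ids.append(None)
--     return "".join(masked_chars), residue_ids
-- ===== Notes on version B (the rewrite author's own statement) =====
-- stated objective: alternative
-- what changed: B replaces A's set that materialises every allowed residue id (one element per integer in every range) by a sorted, merged disjoint interval list queried per character with an early-exit linear scan.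
import Mathlib
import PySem

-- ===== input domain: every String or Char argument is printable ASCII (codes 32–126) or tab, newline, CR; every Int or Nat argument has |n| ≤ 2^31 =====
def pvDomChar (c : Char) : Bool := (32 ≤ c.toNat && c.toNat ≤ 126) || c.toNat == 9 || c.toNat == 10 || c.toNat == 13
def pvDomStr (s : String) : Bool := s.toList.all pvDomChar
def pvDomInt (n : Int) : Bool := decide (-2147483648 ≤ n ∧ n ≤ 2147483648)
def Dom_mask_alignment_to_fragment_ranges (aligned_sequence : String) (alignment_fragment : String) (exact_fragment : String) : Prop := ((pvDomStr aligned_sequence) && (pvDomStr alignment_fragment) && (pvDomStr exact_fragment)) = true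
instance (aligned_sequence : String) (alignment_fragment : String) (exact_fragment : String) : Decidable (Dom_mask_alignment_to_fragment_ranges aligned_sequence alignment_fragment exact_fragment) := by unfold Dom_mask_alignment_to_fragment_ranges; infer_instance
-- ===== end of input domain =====

-- B replaces A's materialised set of every allowed residue id by a sorted merged
-- interval list queried with an early-exit scan (objective: alternative).

-- ===== PORT A =====
-- fragment_ranges: parse one stripped, nonempty part "a-b"; none = ValueError
def pvParsePart (p : List Char) : Option (Int × Int) :=
  match PySem.Chars.splitOnMax p ['-'] 1 with
  | [a, b] =>
    match PySem.Int.ofChars? a, PySem.Int.ofChars? b with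
    | some x, some y => some (x, y)
    | _, _ => none
  | _ => none    -- unpacking "start_text, end_text" fails: ValueError

def pvRangesGo : List (List Char) → List (Int × Int) → Option (List (Int × Int))
  | [], acc => some acc
  | part :: rest, acc =>
    let p := PySem.Chars.strip part
    if p = [] then pvRangesGo rest acc
    else
      match pvParsePart p with
      | some r => pvRangesGo rest (acc ++ [r])
      | none => none

-- fragment_ranges(fragment_key); none where the Python raises ValueError
def pvFragmentRanges? (s : String) : Option (List (Int × Int)) :=
  pvRangesGo (PySem.Chars.splitOn s.toList [',']) []

def pvStepA (allowed : PySem.Set Int) (st : Int × List Char × List (Option Int)) (c : Char) :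
    Int × List Char × List (Option Int) :=
  if PySem.Chars.isalpha c = false then (st.1, st.2.1 ++ [c], st.2.2 ++ [none])
  else if PySem.Set.contains allowed st.1 then (st.1 + 1, st.2.1 ++ [c], st.2.2 ++ [some st.1])
  else (st.1 + 1, st.2.1 ++ ['-'], st.2.2 ++ [none])

def mask_alignment_to_fragment_ranges (aligned_sequence : String) (alignment_fragment : String) (exact_fragment : String) : String × List (Option Int) :=
  if aligned_sequence.toList = [] then ("", [])
  else
    match pvFragmentRanges? exact_fragment, pvFragmentRanges? alignment_fragment with
    | some rs, some ars =>
      let allowed : PySem.Set Int :=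
        rs.foldl (fun s r => PySem.Set.update s (PySem.List.pyRange r.1 (r.2 + 1))) PySem.Set.empty
      let start : Int := match ars with | [] => 1 | r :: _ => r.1
      let fin := aligned_sequence.toList.foldl (pvStepA allowed) (start, [], [])
      (String.ofList fin.2.1, fin.2.2)
    | _, _ => ("", [])    -- Python raises ValueError here: outside Pre_

-- ===== PORT B =====
-- _interval_list(key): parse via a strip-map and a filtered traversal (_parse_pair = pvParsePart)
def pvIntervals? (s : String) : Option (List (Int × Int)) :=
  (((PySem.Chars.splitOn s.toList [',']).map PySem.Chars.strip).filter
      (fun p => !p.isEmpty)).mapM pvParsePart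

def pvMergeStep (acc : List (Int × Int)) (p : Int × Int) : List (Int × Int) :=
  match acc.getLast? with
  | some l =>
    if p.1 ≤ l.2 + 1 then
      (if l.2 < p.2 then acc.dropLast ++ [(l.1, p.2)] else acc)
    else acc ++ [p]
  | none => [p]

-- merged disjoint ascending interval list from the parsed ranges
def pvMerged (rs : List (Int × Int)) : List (Int × Int) :=
  (PySem.List.sorted (rs.filter (fun r => decide (r.1 ≤ r.2))) (fun r => r.1)).foldl pvMergeStep []

-- early-exit scan: for (lo,hi) in merged: if lo > r: break; if r <= hi: True
def pvScanAllowed : List (Int × Int) → Int → Bool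
  | [], _ => false
  | p :: rest, r => if p.1 > r then false else if r ≤ p.2 then true else pvScanAllowed rest r

def pvStepB (merged : List (Int × Int)) (st : Int × List Char × List (Option Int)) (c : Char) :
    Int × List Char × List (Option Int) :=
  if PySem.Chars.isalpha c then
    let ok := pvScanAllowed merged st.1
    (st.1 + 1, st.2.1 ++ [if ok then c else '-'], st.2.2 ++ [if ok then some st.1 else none])
  else (st.1, st.2.1 ++ [c], st.2.2 ++ [none])

def mask_alignment_to_fragment_ranges_alt (aligned_sequence : String) (alignment_fragment : String) (exact_fragment : String) : String × List (Option Int) :=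
  if aligned_sequence.toList = [] then ("", [])
  else
    match pvIntervals? exact_fragment, pvIntervals? alignment_fragment with
    | some rs, some starts =>
      let merged := pvMerged rs
      let residue : Int := match starts with | [] => 1 | r :: _ => r.1
      let fin := aligned_sequence.toList.foldl (pvStepB merged) (residue, [], [])
      (String.ofList fin.2.1, fin.2.2)
    | _, _ => ("", [])    -- Python raises ValueError here: outside Pre_

-- ===== PRECONDITION & SPEC =====
-- A part is well-formed when it splits on the first '-' into two int()-parseable texts
def pvPartOk (part : List Char) : Bool :=
  let p := PySem.Chars.strip part
  p = [] ||
    (match PySem.Chars.splitOnMax p ['-'] 1 with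
     | [a, b] => (PySem.Int.ofChars? a).isSome && (PySem.Int.ofChars? b).isSome
     | _ => false)

def pvFragOk (s : String) : Bool :=
  (PySem.Chars.splitOn s.toList [',']).all pvPartOk

-- Pre_ excludes exactly the inputs on which the Python raises ValueError while parsing
-- a fragment key (a comma part without '-' or with a non-integer side); with a
-- nonempty aligned_sequence both fragment keys are parsed.
def Pre_mask_alignment_to_fragment_ranges (aligned_sequence : String) (alignment_fragment : String) (exact_fragment : String) : Prop :=
  aligned_sequence.toList = [] ∨ (pvFragOk exact_fragment = true ∧ pvFragOk alignment_fragment = true)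

instance (aligned_sequence : String) (alignment_fragment : String) (exact_fragment : String) : Decidable (Pre_mask_alignment_to_fragment_ranges aligned_sequence alignment_fragment exact_fragment) := by unfold Pre_mask_alignment_to_fragment_ranges; infer_instance

def pvWitness_mask_alignment_to_fragment_ranges : String × String × String := ("AB cD-xy", "3-10", "4-5, 1-3")

def Spec_mask_alignment_to_fragment_ranges (aligned_sequence : String) (alignment_fragment : String) (exact_fragment : String) (out : String × List (Option Int)) : Prop := out = mask_alignment_to_fragment_ranges_alt aligned_sequence alignment_fragment exact_fragment
instance (aligned_sequence : String) (alignment_fragment : String) (exact_fragment : String) (out : String × List (Option Int)) : Decidable (Spec_mask_alignment_to_fragment_ranges aligned_sequence alignment_fragment exact_fragment out) := by unfold Spec_mask_alignment_to_fragment_ranges; infer_instance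

-- ===== CLAIM (what is proved, stated in full; the proofs are below) =====
def Claim_equal_mask_alignment_to_fragment_ranges : Prop := ∀ (aligned_sequence : String) (alignment_fragment : String) (exact_fragment : String), Dom_mask_alignment_to_fragment_ranges aligned_sequence alignment_fragment exact_fragment → Pre_mask_alignment_to_fragment_ranges aligned_sequence alignment_fragment exact_fragment → Spec_mask_alignment_to_fragment_ranges aligned_sequence alignment_fragment exact_fragment (mask_alignment_to_fragment_ranges aligned_sequence alignment_fragment exact_fragment)

-- ===== LEMMAS AND PROOFS =====

-- x lies in some parsed range (the union the two ports query in their two ways)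
def pvCover (l : List (Int × Int)) (x : Int) : Prop := ∃ p ∈ l, p.1 ≤ x ∧ x ≤ p.2

lemma pvCover_append (u v : List (Int × Int)) (x : Int) :
    pvCover (u ++ v) x ↔ pvCover u x ∨ pvCover v x := by
  constructor
  · rintro ⟨p, hp, h⟩
    rcases List.mem_append.mp hp with h' | h'
    · exact Or.inl ⟨p, h', h⟩
    · exact Or.inr ⟨p, h', h⟩
  · rintro (⟨p, hp, h⟩ | ⟨p, hp, h⟩)
    · exact ⟨p, List.mem_append.mpr (Or.inl hp), h⟩
    · exact ⟨p, List.mem_append.mpr (Or.inr hp), h⟩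

lemma pvSetA_mem (rs : List (Int × Int)) (s0 : PySem.Set Int) (x : Int) :
    x ∈ rs.foldl (fun s r => PySem.Set.update s (PySem.List.pyRange r.1 (r.2 + 1))) s0 ↔
      x ∈ s0 ∨ pvCover rs x := by
  induction rs generalizing s0 with
  | nil => simp [pvCover]
  | cons r rest ih =>
    simp only [List.foldl_cons]
    rw [ih, PySem.Set.mem_update]
    simp only [pvCover, PySem.List.mem_pyRange_one, List.mem_cons, Int.lt_add_one_iff]
    constructor
    · rintro ((h | h) | ⟨p, hp, h⟩)
      · exact Or.inl h
      · exact Or.inr ⟨r, Or.inl rfl, h⟩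
      · exact Or.inr ⟨p, Or.inr hp, h⟩
    · rintro (h | ⟨p, (rfl | hp), h⟩)
      · exact Or.inl (Or.inl h)
      · exact Or.inl (Or.inr h)
      · exact Or.inr ⟨p, hp, h⟩

lemma pvAcc_eq_dropLast (acc : List (Int × Int)) (l : Int × Int)
    (h : acc.getLast? = some l) : acc = acc.dropLast ++ [l] := by
  have hne : acc ≠ [] := by rintro rfl; simp at h
  have h2 := List.dropLast_concat_getLast hne
  rw [List.getLast?_eq_some_getLast hne] at h
  simp only [Option.some.injEq] at h
  rw [← h]
  exact h2.symm

lemma pvMergeStep_cover (acc : List (Int × Int)) (p : Int × Int)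
    (hl : ∀ l, acc.getLast? = some l → l.1 ≤ p.1) (hp : p.1 ≤ p.2) (x : Int) :
    (pvCover (pvMergeStep acc p) x ↔ pvCover acc x ∨ (p.1 ≤ x ∧ x ≤ p.2)) := by
  unfold pvMergeStep
  cases hacc : acc.getLast? with
  | none =>
    have : acc = [] := List.getLast?_eq_none_iff.mp hacc
    subst this
    simp [pvCover]
  | some l =>
    have hle : l.1 ≤ p.1 := hl l hacc
    have hsplit := pvAcc_eq_dropLast acc l hacc
    dsimp only
    split_ifs with h1 h2
    · rw [pvCover_append]
      conv_rhs => rw [hsplit, pvCover_append]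
      simp only [pvCover, List.mem_singleton]
      constructor
      · rintro (h | ⟨q, rfl, hq⟩)
        · exact Or.inl (Or.inl h)
        · by_cases hx : x ≤ l.2
          · exact Or.inl (Or.inr ⟨l, rfl, hq.1, hx⟩)
          · exact Or.inr ⟨by omega, hq.2⟩
      · rintro ((h | ⟨q, rfl, hq⟩) | h)
        · exact Or.inl h
        · exact Or.inr ⟨(q.1, p.2), rfl, by omega⟩
        · exact Or.inr ⟨(l.1, p.2), rfl, by omega⟩
    · constructor
      · exact Or.inl
      · rintro (h | h)
        · exact h
        · rw [hsplit, pvCover_append]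
          exact Or.inr ⟨l, List.mem_singleton.mpr rfl, by omega⟩
    · rw [pvCover_append]
      simp only [pvCover, List.mem_singleton]
      constructor
      · rintro (h | ⟨q, rfl, hq⟩)
        · exact Or.inl h
        · exact Or.inr hq
      · rintro (h | h)
        · exact Or.inl h
        · exact Or.inr ⟨p, rfl, h⟩

lemma pvMergeStep_last (acc : List (Int × Int)) (p : Int × Int)
    (hl : ∀ l, acc.getLast? = some l → l.1 ≤ p.1) :
    ∃ l', (pvMergeStep acc p).getLast? = some l' ∧ l'.1 ≤ p.1 := by
  unfold pvMergeStep
  cases hacc : acc.getLast? with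
  | none => exact ⟨p, rfl, le_refl _⟩
  | some l =>
    have hle : l.1 ≤ p.1 := hl l hacc
    dsimp only
    split_ifs with h1 h2
    · exact ⟨(l.1, p.2), by simp, hle⟩
    · exact ⟨l, hacc, hle⟩
    · exact ⟨p, by simp, le_refl _⟩

lemma pvMergeStep_pairwise (acc : List (Int × Int)) (p : Int × Int)
    (hacc : acc.Pairwise (fun a b => a.1 ≤ b.1))
    (hl : ∀ l, acc.getLast? = some l → l.1 ≤ p.1) :
    (pvMergeStep acc p).Pairwise (fun a b => a.1 ≤ b.1) := by
  unfold pvMergeStep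
  cases hlast : acc.getLast? with
  | none => simp
  | some l =>
    have hle : l.1 ≤ p.1 := hl l hlast
    have hsplit := pvAcc_eq_dropLast acc l hlast
    have hpw : acc.dropLast.Pairwise (fun a b => a.1 ≤ b.1) ∧ ∀ a ∈ acc.dropLast, a.1 ≤ l.1 := by
      rw [hsplit] at hacc
      rw [List.pairwise_append] at hacc
      exact ⟨hacc.1, fun a ha => hacc.2.2 a ha l (List.mem_singleton.mpr rfl)⟩
    dsimp only
    split_ifs with h1 h2
    · rw [List.pairwise_append]
      exact ⟨hpw.1, List.pairwise_singleton _ _, fun a ha b hb => by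
        rw [List.mem_singleton] at hb; subst hb; exact hpw.2 a ha⟩
    · exact hacc
    · rw [List.pairwise_append]
      refine ⟨hacc, List.pairwise_singleton _ _, fun a ha b hb => ?_⟩
      rw [List.mem_singleton] at hb; subst hb
      rw [hsplit] at ha
      rcases List.mem_append.mp ha with h | h
      · exact le_trans (hpw.2 a h) hle
      · rw [List.mem_singleton] at h; subst h; exact hle

lemma pvMergeFold_cover (ivs : List (Int × Int)) (acc : List (Int × Int))
    (hsorted : ivs.Pairwise (fun p q => p.1 ≤ q.1))
    (hne : ∀ p ∈ ivs, p.1 ≤ p.2)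
    (hl : ∀ p ∈ ivs, ∀ l, acc.getLast? = some l → l.1 ≤ p.1) (x : Int) :
    (pvCover (ivs.foldl pvMergeStep acc) x ↔ pvCover acc x ∨ pvCover ivs x) := by
  induction ivs generalizing acc with
  | nil => simp [pvCover]
  | cons p rest ih =>
    simp only [List.foldl_cons]
    rw [List.pairwise_cons] at hsorted
    have hlp : ∀ l, acc.getLast? = some l → l.1 ≤ p.1 :=
      fun l h => hl p (List.mem_cons_self) l h
    have hrest : ∀ q ∈ rest, ∀ l, (pvMergeStep acc p).getLast? = some l → l.1 ≤ q.1 := by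
      intro q hq l h
      obtain ⟨l', hl', hle'⟩ := pvMergeStep_last acc p hlp
      rw [hl'] at h
      simp only [Option.some.injEq] at h
      subst h
      exact le_trans hle' (hsorted.1 q hq)
    rw [ih (pvMergeStep acc p) hsorted.2 (fun q hq => hne q (List.mem_cons_of_mem _ hq)) hrest]
    rw [pvMergeStep_cover acc p hlp (hne p List.mem_cons_self)]
    simp only [pvCover, List.mem_cons]
    constructor
    · rintro ((h | h) | ⟨q, hq, h⟩)
      · exact Or.inl h
      · exact Or.inr ⟨p, Or.inl rfl, h⟩
      · exact Or.inr ⟨q, Or.inr hq, h⟩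
    · rintro (h | ⟨q, (rfl | hq), h⟩)
      · exact Or.inl (Or.inl h)
      · exact Or.inl (Or.inr h)
      · exact Or.inr ⟨q, hq, h⟩

lemma pvMergeFold_pairwise (ivs : List (Int × Int)) (acc : List (Int × Int))
    (hsorted : ivs.Pairwise (fun p q => p.1 ≤ q.1))
    (hacc : acc.Pairwise (fun a b => a.1 ≤ b.1))
    (hl : ∀ p ∈ ivs, ∀ l, acc.getLast? = some l → l.1 ≤ p.1) :
    (ivs.foldl pvMergeStep acc).Pairwise (fun a b => a.1 ≤ b.1) := by
  induction ivs generalizing acc with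
  | nil => exact hacc
  | cons p rest ih =>
    simp only [List.foldl_cons]
    rw [List.pairwise_cons] at hsorted
    have hlp : ∀ l, acc.getLast? = some l → l.1 ≤ p.1 :=
      fun l h => hl p (List.mem_cons_self) l h
    refine ih (pvMergeStep acc p) hsorted.2 (pvMergeStep_pairwise acc p hacc hlp) ?_
    intro q hq l h
    obtain ⟨l', hl', hle'⟩ := pvMergeStep_last acc p hlp
    rw [hl'] at h
    simp only [Option.some.injEq] at h
    subst h
    exact le_trans hle' (hsorted.1 q hq)

lemma pvMerged_cover (rs : List (Int × Int)) (x : Int) :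
    pvCover (pvMerged rs) x ↔ pvCover rs x := by
  unfold pvMerged
  set f := rs.filter (fun r => decide (r.1 ≤ r.2)) with hf
  rw [pvMergeFold_cover _ [] (PySem.List.sorted_pairwise f (fun r => r.1))
      (fun p hp => by
        have := List.of_mem_filter ((PySem.List.mem_sorted _ _ _ _).mp hp)
        exact of_decide_eq_true this)
      (fun p _ l h => by simp at h)]
  simp only [pvCover, PySem.List.mem_sorted _ _ _ _]
  constructor
  · rintro (⟨q, hq, _⟩ | ⟨q, hq, h⟩)
    · simp at hq
    · exact ⟨q, List.mem_of_mem_filter hq, h⟩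
  · rintro ⟨q, hq, h⟩
    exact Or.inr ⟨q, List.mem_filter.mpr ⟨hq, by simp; omega⟩, h⟩

lemma pvMerged_sorted (rs : List (Int × Int)) :
    (pvMerged rs).Pairwise (fun p q => p.1 ≤ q.1) := by
  unfold pvMerged
  exact pvMergeFold_pairwise _ [] (PySem.List.sorted_pairwise _ _) (List.Pairwise.nil)
    (fun p _ l h => by simp at h)

lemma pvScan_iff (l : List (Int × Int)) (hs : l.Pairwise (fun p q => p.1 ≤ q.1)) (x : Int) :
    (pvScanAllowed l x = true ↔ pvCover l x) := by
  induction l with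
  | nil => simp [pvScanAllowed, pvCover]
  | cons p rest ih =>
    rw [List.pairwise_cons] at hs
    unfold pvScanAllowed
    split_ifs with h1 h2
    · simp only [false_iff]
      rintro ⟨q, hq, hx⟩
      rcases List.mem_cons.mp hq with rfl | hq
      · omega
      · have := hs.1 q hq; omega
    · simp only [true_iff]
      exact ⟨p, List.mem_cons_self, by omega, h2⟩
    · rw [ih hs.2]
      simp only [pvCover, List.mem_cons]
      constructor
      · rintro ⟨q, hq, hx⟩
        exact ⟨q, Or.inr hq, hx⟩
      · rintro ⟨q, (rfl | hq), hx⟩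
        · omega
        · exact ⟨q, hq, hx⟩

lemma pvRangesGo_eq (parts : List (List Char)) (acc : List (Int × Int)) :
    pvRangesGo parts acc =
      (((parts.map PySem.Chars.strip).filter (fun p => !p.isEmpty)).mapM pvParsePart).map
        (fun l => acc ++ l) := by
  induction parts generalizing acc with
  | nil => simp [pvRangesGo]
  | cons part rest ih =>
    unfold pvRangesGo
    simp only [List.map_cons]
    by_cases hmt : PySem.Chars.strip part = []
    · rw [ih]
      simp [hmt]
    · have : (PySem.Chars.strip part).isEmpty = false := by
        simpa [List.isEmpty_iff] using hmt
      simp only [hmt, List.filter_cons, this]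
      cases hp : pvParsePart (PySem.Chars.strip part) with
      | none => simp [List.mapM_cons, hp]
      | some r =>
        cases hm : (((rest.map PySem.Chars.strip).filter (fun p => !p.isEmpty)).mapM pvParsePart) with
        | none => simp [ih, List.mapM_cons, hp, hm]
        | some l => simp [ih, List.mapM_cons, hp, hm]

lemma pvIntervals_eq (s : String) : pvIntervals? s = pvFragmentRanges? s := by
  unfold pvIntervals? pvFragmentRanges?
  rw [pvRangesGo_eq]
  cases (((PySem.Chars.splitOn s.toList [',']).map PySem.Chars.strip).filter
      (fun p => !p.isEmpty)).mapM pvParsePart with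
  | none => rfl
  | some l => simp

lemma pvAllowed_eq (rs : List (Int × Int)) (x : Int) :
    PySem.Set.contains
      (rs.foldl (fun s r => PySem.Set.update s (PySem.List.pyRange r.1 (r.2 + 1))) PySem.Set.empty) x
      = pvScanAllowed (pvMerged rs) x := by
  have h1 : (PySem.Set.contains
      (rs.foldl (fun s r => PySem.Set.update s (PySem.List.pyRange r.1 (r.2 + 1))) PySem.Set.empty) x = true)
      ↔ (pvScanAllowed (pvMerged rs) x = true) := by
    rw [PySem.Set.contains_iff, pvSetA_mem, pvScan_iff _ (pvMerged_sorted rs), pvMerged_cover]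
    simp [PySem.Set.empty]
  cases ha : PySem.Set.contains (rs.foldl (fun s r => PySem.Set.update s (PySem.List.pyRange r.1 (r.2 + 1))) PySem.Set.empty) x
  · cases hb : pvScanAllowed (pvMerged rs) x
    · rfl
    · rw [ha, hb] at h1; simp at h1
  · cases hb : pvScanAllowed (pvMerged rs) x
    · rw [ha, hb] at h1; simp at h1
    · rfl

-- ===== VERDICT (by name: the statement is the Claim_ definition above) =====
theorem mask_alignment_to_fragment_ranges_spec : Claim_equal_mask_alignment_to_fragment_ranges := by
  intro aseq af ef _ _
  unfold Spec_mask_alignment_to_fragment_ranges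
  unfold mask_alignment_to_fragment_ranges mask_alignment_to_fragment_ranges_alt
  rw [pvIntervals_eq, pvIntervals_eq]
  by_cases hempty : aseq.toList = []
  · simp [hempty]
  · simp only [if_neg hempty]
    cases hef : pvFragmentRanges? ef with
    | none => rfl
    | some rs =>
      cases haf : pvFragmentRanges? af with
      | none => rfl
      | some ars =>
        have hstep : pvStepA (rs.foldl (fun s r => PySem.Set.update s (PySem.List.pyRange r.1 (r.2 + 1))) PySem.Set.empty) = pvStepB (pvMerged rs) := by
          funext st c
          unfold pvStepA pvStepB
          by_cases halpha : PySem.Chars.isalpha c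
          · rw [pvAllowed_eq]
            by_cases hok : pvScanAllowed (pvMerged rs) st.1 = true
            · simp [halpha, hok]
            · simp [halpha, hok]
          · simp [halpha]
        simp only [hstep]
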